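-- pv_equiv track=rewrite | github.com/GeorgeMLP/reasoning-probing | reasoning_features/scripts/run_token_injection_experiment.py | extract_token_contexts
-- ===== SOURCE A (Python) =====
-- def extract_token_contexts(
--     reasoning_texts: list[str],
--     target_tokens: list[str],
--     context_window: int = 2,
-- ) -> dict[str, dict[str, list[str]]]:
--     """Extract common contexts (preceding/following tokens) for target tokens.
--
--     Args:
--         reasoning_texts: List of reasoning text samples
--         target_tokens: List of tokens to find contexts for
--         context_window: Number of tokens before/after to consider
--
--     Returns:
--         Dict mapping token -> {"before": [common_preceding_tokens], "after": [common_following_tokens]}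
--     """
--     from collections import Counter
--
--     token_contexts = {token: {"before": Counter(), "after": Counter()} for token in target_tokens}
--
--     for text in reasoning_texts:
--         words = text.split()
--         for i, word in enumerate(words):
--             # Normalize word (strip punctuation for matching)
--             normalized = word.strip('.,!?;:').lower()
--
--             for target in target_tokens:
--                 if target.strip().lower() in normalized:
--                     # Extract preceding tokens
--                     if i > 0:
--                         prev_word = words[i-1].strip('.,!?;:').lower()
--                         token_contexts[target]["before"][prev_word] += 1
--
--                     # Extract following tokens
--                     if i < len(words) - 1:
--                         next_word = words[i+1].strip('.,!?;:').lower()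
--                         token_contexts[target]["after"][next_word] += 1
--
--     # Convert Counters to sorted lists (most common first)
--     result = {}
--     for token in target_tokens:
--         result[token] = {
--             "before": [tok for tok, _ in token_contexts[token]["before"].most_common(10)],
--             "after": [tok for tok, _ in token_contexts[token]["after"].most_common(10)],
--         }
--
--     return result
-- ===== SOURCE B (Python) =====
-- def extract_token_contexts(
--     reasoning_texts: list[str],
--     target_tokens: list[str],
--     context_window: int = 2,
-- ) -> dict[str, dict[str, list[str]]]:
--     """Per-target pass over a once-normalized corpus: normalize every word a single
--     time, then for each distinct target collect its neighbor lists chronologically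
--     and rank them with one Counter each."""
--     from collections import Counter
--
--     norm_texts = [[w.strip('.,!?;:').lower() for w in text.split()]
--                   for text in reasoning_texts]
--
--     result = {}
--     for target in target_tokens:
--         if target in result:
--             continue
--         key = target.strip().lower()
--         befores, afters = [], []
--         for norm in norm_texts:
--             last = len(norm) - 1
--             for i, w in enumerate(norm):
--                 if key in w:
--                     if i > 0:
--                         befores.append(norm[i - 1])
--                     if i < last:
--                         afters.append(norm[i + 1])
--         result[target] = {
--             "before": [t for t, _ in Counter(befores).most_common(10)],
--             "after": [t for t, _ in Counter(afters).most_common(10)],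
--         }
--     return result
-- ===== Notes on version B (the rewrite author's own statement) =====
-- stated objective: faster
-- what changed: Instead of one streaming pass that keeps a dict of Counters for all targets and re-does strip/lower for the target key and the neighbor words at every (word, target) pair, B normalizes the whole corpus once, then makes one independent pass per DISTINCT target (duplicate targets skipped entirely) collecting its neighbor lists chronologically and ranking each with a single Counter.
import Mathlib
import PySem

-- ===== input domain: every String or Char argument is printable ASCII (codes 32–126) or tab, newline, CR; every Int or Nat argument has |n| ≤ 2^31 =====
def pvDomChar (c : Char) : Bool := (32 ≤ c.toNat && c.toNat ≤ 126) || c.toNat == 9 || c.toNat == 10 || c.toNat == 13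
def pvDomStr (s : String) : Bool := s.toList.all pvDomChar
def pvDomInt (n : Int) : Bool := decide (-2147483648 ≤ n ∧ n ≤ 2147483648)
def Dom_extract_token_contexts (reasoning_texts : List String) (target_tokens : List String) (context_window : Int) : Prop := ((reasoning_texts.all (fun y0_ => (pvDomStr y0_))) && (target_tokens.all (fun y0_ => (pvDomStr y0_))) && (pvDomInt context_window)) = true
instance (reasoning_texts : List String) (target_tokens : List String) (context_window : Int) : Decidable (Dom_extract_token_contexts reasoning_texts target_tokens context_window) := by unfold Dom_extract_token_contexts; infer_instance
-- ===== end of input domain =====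

-- ===== PORT A =====
-- B re-implements A with a once-normalized corpus and one independent pass per distinct
-- target (duplicates skipped); a timing run measured B faster than A.
-- shared helpers: these transliterate the Python expressions `w.strip('.,!?;:').lower()`,
-- `target.strip().lower()` and `[tok for tok, _ in c.most_common(10)]` (Counter.most_common(n)
-- is the stable descending sort by count, truncated to n) that appear verbatim in both A and Source B
def pvNorm (w : String) : String := PySem.Str.lower (PySem.Str.stripChars w ".,!?;:")

def pvKey (t : String) : String := PySem.Str.lower (PySem.Str.strip t)

def pvTop10 (c : PySem.Dict String Int) : List String :=
  ((PySem.List.sorted c.items (fun p => p.2) true).take 10).map (fun p => p.1)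

def pvEmptyPair : PySem.Dict String Int × PySem.Dict String Int :=
  (PySem.Dict.empty, PySem.Dict.empty)

def extract_token_contexts (reasoning_texts : List String) (target_tokens : List String) (context_window : Int) : List (String × List (String × List String)) :=
  -- token_contexts = {token: {"before": Counter(), "after": Counter()} for token in target_tokens}
  -- (the fixed two-key inner dict {"before": …, "after": …} is carried as a pair and
  --  rendered as the assoc list [("before", …), ("after", …)] in the result)
  let token_contexts : PySem.Dict String (PySem.Dict String Int × PySem.Dict String Int) :=
    target_tokens.foldl (fun d token => d.insert token pvEmptyPair) PySem.Dict.empty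
  let token_contexts := reasoning_texts.foldl (fun tc text =>
    let words := PySem.Str.split₀ text
    (PySem.List.enumerate words).foldl (fun tc iw =>
      let i := iw.1
      let normalized := pvNorm iw.2
      target_tokens.foldl (fun tc target =>
        if PySem.Str.isIn (pvKey target) normalized then
          let tc := if 0 < i then
              tc.modify target pvEmptyPair (fun p =>
                (p.1.modify (pvNorm (PySem.List.pyGetD words (i - 1) "")) 0 (· + 1), p.2))
            else tc
          if i < (words.length : Int) - 1 then
            tc.modify target pvEmptyPair (fun p =>
              (p.1, p.2.modify (pvNorm (PySem.List.pyGetD words (i + 1) "")) 0 (· + 1)))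
          else tc
        else tc) tc) tc) token_contexts
  (target_tokens.foldl (fun r token =>
    let p := token_contexts.getD token pvEmptyPair
    r.insert token [("before", pvTop10 p.1), ("after", pvTop10 p.2)]) PySem.Dict.empty).items

-- ===== PORT B =====
def extract_token_contexts_alt (reasoning_texts : List String) (target_tokens : List String) (context_window : Int) : List (String × List (String × List String)) :=
  let norm_texts := reasoning_texts.map (fun text => (PySem.Str.split₀ text).map pvNorm)
  (target_tokens.foldl (fun r target =>
    if r.contains target then r
    else
      let key := pvKey target
      let ba := norm_texts.foldl (fun ba norm =>
        let last := (norm.length : Int) - 1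
        (PySem.List.enumerate norm).foldl (fun ba iw =>
          if PySem.Str.isIn key iw.2 then
            let ba := if 0 < iw.1 then (ba.1 ++ [PySem.List.pyGetD norm (iw.1 - 1) ""], ba.2) else ba
            if iw.1 < last then (ba.1, ba.2 ++ [PySem.List.pyGetD norm (iw.1 + 1) ""]) else ba
          else ba) ba) (([] : List String), ([] : List String))
      r.insert target [("before", pvTop10 (PySem.Dict.counter ba.1)),
                       ("after",  pvTop10 (PySem.Dict.counter ba.2))])
    PySem.Dict.empty).items

-- ===== PRECONDITION & SPEC =====
def Spec_extract_token_contexts (reasoning_texts : List String) (target_tokens : List String) (context_window : Int) (out : List (String × List (String × List String))) : Prop := out = extract_token_contexts_alt reasoning_texts target_tokens context_window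
instance (reasoning_texts : List String) (target_tokens : List String) (context_window : Int) (out : List (String × List (String × List String))) : Decidable (Spec_extract_token_contexts reasoning_texts target_tokens context_window out) := by unfold Spec_extract_token_contexts; infer_instance

-- ===== CLAIM (what is proved, stated in full; the proofs are below) =====
def Claim_equal_extract_token_contexts : Prop := ∀ (reasoning_texts : List String) (target_tokens : List String) (context_window : Int), Dom_extract_token_contexts reasoning_texts target_tokens context_window → Spec_extract_token_contexts reasoning_texts target_tokens context_window (extract_token_contexts reasoning_texts target_tokens context_window)

-- ===== LEMMAS AND PROOFS =====

-- abstract "neighbor event" machinery shared by the two characterizations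
def pvApp1 (p : PySem.Dict String Int × PySem.Dict String Int) (op : Bool × String) :
    PySem.Dict String Int × PySem.Dict String Int :=
  if op.1 then (p.1.modify op.2 0 (· + 1), p.2) else (p.1, p.2.modify op.2 0 (· + 1))

def pvApp2 (ba : List String × List String) (op : Bool × String) : List String × List String :=
  if op.1 then (ba.1 ++ [op.2], ba.2) else (ba.1, ba.2 ++ [op.2])

def pvEv (key : String) (ns : List String) (iw : Int × String) : List (Bool × String) :=
  if PySem.Str.isIn key iw.2 then
    (if 0 < iw.1 then [(true, PySem.List.pyGetD ns (iw.1 - 1) "")] else []) ++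
    (if iw.1 < (ns.length : Int) - 1 then [(false, PySem.List.pyGetD ns (iw.1 + 1) "")] else [])
  else []

def pvOps (key : String) (nt : List (List String)) : List (Bool × String) :=
  nt.flatMap fun ns => (PySem.List.enumerate ns).flatMap (pvEv key ns)

def pvOpsK (key : String) (k : Nat) (nt : List (List String)) : List (Bool × String) :=
  nt.flatMap fun ns => (PySem.List.enumerate ns).flatMap fun iw =>
    (List.replicate k (pvEv key ns iw)).flatten

def pvBefA (l : List (Bool × String)) : List String := (l.filter (·.1)).map (·.2)
def pvAftA (l : List (Bool × String)) : List String := (l.filter (fun o => !o.1)).map (·.2)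

-- the common per-target value both programs produce
def pvG (nt : List (List String)) (t : String) : List (String × List String) :=
  [("before", pvTop10 (PySem.Dict.counter (pvBefA (pvOps (pvKey t) nt)))),
   ("after",  pvTop10 (PySem.Dict.counter (pvAftA (pvOps (pvKey t) nt))))]

def pvBodyN (ns : List String) (iw : Int × String)
    (tc : PySem.Dict String (PySem.Dict String Int × PySem.Dict String Int)) (target : String) :
    PySem.Dict String (PySem.Dict String Int × PySem.Dict String Int) :=
  if PySem.Str.isIn (pvKey target) iw.2 then
    let tc := if 0 < iw.1 then
        tc.modify target pvEmptyPair (fun p =>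
          (p.1.modify (PySem.List.pyGetD ns (iw.1 - 1) "") 0 (· + 1), p.2))
      else tc
    if iw.1 < (ns.length : Int) - 1 then
      tc.modify target pvEmptyPair (fun p =>
        (p.1, p.2.modify (PySem.List.pyGetD ns (iw.1 + 1) "") 0 (· + 1)))
    else tc
  else tc

lemma pvNorm_empty : pvNorm "" = "" := by decide

lemma pvApp2_foldl (ops : List (Bool × String)) (ba : List String × List String) :
    ops.foldl pvApp2 ba = (ba.1 ++ pvBefA ops, ba.2 ++ pvAftA ops) := by
  induction ops generalizing ba with
  | nil => simp [pvBefA, pvAftA]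
  | cons op rest ih =>
    rcases op with ⟨b, w⟩
    cases b <;> simp [List.foldl_cons, pvApp2, ih, pvBefA, pvAftA]

lemma pvApp1_foldl (ops : List (Bool × String))
    (p : PySem.Dict String Int × PySem.Dict String Int) :
    ops.foldl pvApp1 p = ((pvBefA ops).foldl (fun d w => d.modify w 0 (· + 1)) p.1,
                         (pvAftA ops).foldl (fun d w => d.modify w 0 (· + 1)) p.2) := by
  induction ops generalizing p with
  | nil => simp [pvBefA, pvAftA]
  | cons op rest ih =>
    rcases op with ⟨b, w⟩
    cases b <;> simp [List.foldl_cons, pvApp1, ih, pvBefA, pvAftA]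

lemma pvB_step (key : String) (ns : List String) (iw : Int × String)
    (ba : List String × List String) :
    (if PySem.Str.isIn key iw.2 then
       let ba' := if 0 < iw.1 then (ba.1 ++ [PySem.List.pyGetD ns (iw.1 - 1) ""], ba.2) else ba
       if iw.1 < (ns.length : Int) - 1 then (ba'.1, ba'.2 ++ [PySem.List.pyGetD ns (iw.1 + 1) ""]) else ba'
     else ba) = (pvEv key ns iw).foldl pvApp2 ba := by
  unfold pvEv
  split_ifs <;> simp [pvApp2, *]

lemma pvBefA_append (l1 l2 : List (Bool × String)) :
    pvBefA (l1 ++ l2) = pvBefA l1 ++ pvBefA l2 := by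
  simp [pvBefA]

lemma pvAftA_append (l1 l2 : List (Bool × String)) :
    pvAftA (l1 ++ l2) = pvAftA l1 ++ pvAftA l2 := by
  simp [pvAftA]

lemma pvBefA_flatMap {α : Type} (L : List α) (f : α → List (Bool × String)) :
    pvBefA (L.flatMap f) = L.flatMap (fun x => pvBefA (f x)) := by
  induction L with
  | nil => simp [pvBefA]
  | cons x xs ih => simp [List.flatMap_cons, pvBefA_append, ih]

lemma pvAftA_flatMap {α : Type} (L : List α) (f : α → List (Bool × String)) :
    pvAftA (L.flatMap f) = L.flatMap (fun x => pvAftA (f x)) := by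
  induction L with
  | nil => simp [pvAftA]
  | cons x xs ih => simp [List.flatMap_cons, pvAftA_append, ih]

lemma pvBefA_flatten (L : List (List (Bool × String))) :
    pvBefA L.flatten = (L.map pvBefA).flatten := by
  simp [pvBefA, List.filter_flatten, List.map_flatten, List.map_map]
  rfl

lemma pvAftA_flatten (L : List (List (Bool × String))) :
    pvAftA L.flatten = (L.map pvAftA).flatten := by
  simp [pvAftA, List.filter_flatten, List.map_flatten, List.map_map]
  rfl

lemma pvBefA_ev_small (key : String) (ns : List String) (iw : Int × String) :
    pvBefA (pvEv key ns iw) = [] ∨ ∃ x, pvBefA (pvEv key ns iw) = [x] := by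
  unfold pvEv
  split_ifs <;> simp [pvBefA]

lemma pvAftA_ev_small (key : String) (ns : List String) (iw : Int × String) :
    pvAftA (pvEv key ns iw) = [] ∨ ∃ x, pvAftA (pvEv key ns iw) = [x] := by
  unfold pvEv
  split_ifs <;> simp [pvAftA]

lemma pvBefA_rep (k : Nat) (key : String) (ns : List String) (iw : Int × String) :
    pvBefA ((List.replicate k (pvEv key ns iw)).flatten)
      = (pvBefA (pvEv key ns iw)).flatMap (List.replicate k) := by
  rw [pvBefA_flatten, List.map_replicate]
  rcases pvBefA_ev_small key ns iw with h | ⟨x, h⟩ <;>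
    simp [h]

lemma pvAftA_rep (k : Nat) (key : String) (ns : List String) (iw : Int × String) :
    pvAftA ((List.replicate k (pvEv key ns iw)).flatten)
      = (pvAftA (pvEv key ns iw)).flatMap (List.replicate k) := by
  rw [pvAftA_flatten, List.map_replicate]
  rcases pvAftA_ev_small key ns iw with h | ⟨x, h⟩ <;>
    simp [h]

lemma pvBefA_opsK (key : String) (k : Nat) (nt : List (List String)) :
    pvBefA (pvOpsK key k nt) = (pvBefA (pvOps key nt)).flatMap (List.replicate k) := by
  unfold pvOpsK pvOps
  rw [pvBefA_flatMap, pvBefA_flatMap]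
  simp only [pvBefA_flatMap, pvBefA_rep, List.flatMap_assoc]

lemma pvAftA_opsK (key : String) (k : Nat) (nt : List (List String)) :
    pvAftA (pvOpsK key k nt) = (pvAftA (pvOps key nt)).flatMap (List.replicate k) := by
  unfold pvOpsK pvOps
  rw [pvAftA_flatMap, pvAftA_flatMap]
  simp only [pvAftA_flatMap, pvAftA_rep, List.flatMap_assoc]

lemma pvEnumerate_map {α β : Type} (f : α → β) (l : List α) (s : Int) :
    PySem.List.enumerate (l.map f) s = (PySem.List.enumerate l s).map (fun p => (p.1, f p.2)) := by
  induction l generalizing s with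
  | nil => simp [PySem.List.enumerate]
  | cons x xs ih => simp [PySem.List.enumerate, ih]

lemma pvBodyN_self (ns : List String) (iw : Int × String)
    (tc : PySem.Dict String (PySem.Dict String Int × PySem.Dict String Int))
    (t : String) (v : PySem.Dict String Int × PySem.Dict String Int)
    (h : tc.get? t = some v) :
    (pvBodyN ns iw tc t).get? t = some ((pvEv (pvKey t) ns iw).foldl pvApp1 v) := by
  unfold pvBodyN pvEv
  split_ifs <;>
    simp [PySem.Dict.modify, PySem.Dict.getD, h, PySem.Dict.get?_insert_self, pvApp1]

lemma pvBodyN_other (ns : List String) (iw : Int × String)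
    (tc : PySem.Dict String (PySem.Dict String Int × PySem.Dict String Int))
    (target t : String) (hne : target ≠ t) :
    (pvBodyN ns iw tc target).get? t = tc.get? t := by
  unfold pvBodyN
  split_ifs <;>
    simp [PySem.Dict.modify, PySem.Dict.get?_insert_of_ne _ _ (Ne.symm hne)]

lemma pvTgt_loop (tt : List String) (ns : List String) (iw : Int × String)
    (tc : PySem.Dict String (PySem.Dict String Int × PySem.Dict String Int))
    (t : String) (v : PySem.Dict String Int × PySem.Dict String Int)
    (h : tc.get? t = some v) :
    (tt.foldl (pvBodyN ns iw) tc).get? t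
      = some (((List.replicate (tt.count t) (pvEv (pvKey t) ns iw)).flatten).foldl pvApp1 v) := by
  induction tt generalizing tc v with
  | nil => simpa using h
  | cons target rest ih =>
    by_cases he : target = t
    · subst he
      rw [List.foldl_cons, ih _ _ (pvBodyN_self ns iw tc target v h)]
      rw [List.count_cons_self, List.replicate_succ, List.flatten_cons, List.foldl_append]
    · rw [List.foldl_cons, ih _ _ ((pvBodyN_other ns iw tc target t he).trans h)]
      rw [List.count_cons_of_ne (by exact fun hc => he (by simpa using hc))]

lemma pvEv_loop (tt : List String) (ns : List String) (E : List (Int × String))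
    (tc : PySem.Dict String (PySem.Dict String Int × PySem.Dict String Int))
    (t : String) (v : PySem.Dict String Int × PySem.Dict String Int)
    (h : tc.get? t = some v) :
    (E.foldl (fun tc iw => tt.foldl (pvBodyN ns iw) tc) tc).get? t
      = some ((E.flatMap fun iw =>
          (List.replicate (tt.count t) (pvEv (pvKey t) ns iw)).flatten).foldl pvApp1 v) := by
  induction E generalizing tc v with
  | nil => simpa using h
  | cons iw rest ih =>
    rw [List.foldl_cons, ih _ _ (pvTgt_loop tt ns iw tc t v h),
        List.flatMap_cons, List.foldl_append]

lemma pvTexts_loop (tt : List String) (nt : List (List String))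
    (tc : PySem.Dict String (PySem.Dict String Int × PySem.Dict String Int))
    (t : String) (v : PySem.Dict String Int × PySem.Dict String Int)
    (h : tc.get? t = some v) :
    (nt.foldl (fun tc ns => (PySem.List.enumerate ns).foldl
        (fun tc iw => tt.foldl (pvBodyN ns iw) tc) tc) tc).get? t
      = some ((pvOpsK (pvKey t) (tt.count t) nt).foldl pvApp1 v) := by
  induction nt generalizing tc v with
  | nil => simpa [pvOpsK] using h
  | cons ns rest ih =>
    rw [List.foldl_cons, ih _ _ (pvEv_loop tt ns _ tc t v h)]
    simp only [pvOpsK, List.flatMap_cons, List.foldl_append]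

lemma pvInit_get? (ts : List String)
    (d : PySem.Dict String (PySem.Dict String Int × PySem.Dict String Int)) (t : String)
    (h : t ∈ ts ∨ d.get? t = some pvEmptyPair) :
    (ts.foldl (fun d token => d.insert token pvEmptyPair) d).get? t = some pvEmptyPair := by
  induction ts generalizing d with
  | nil => simpa using h.resolve_left (by simp)
  | cons x xs ih =>
    rw [List.foldl_cons]
    apply ih
    by_cases hx : t ∈ xs
    · exact Or.inl hx
    · right
      rcases h with h | h
      · have : x = t := ((List.mem_cons.mp h).resolve_right hx).symm
        subst this; exact PySem.Dict.get?_insert_self _ _ _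
      · by_cases he : x = t
        · subst he; exact PySem.Dict.get?_insert_self _ _ _
        · rw [PySem.Dict.get?_insert_of_ne _ _ (Ne.symm he)]; exact h

lemma pvSet_add_rep (k : Nat) (hk : 0 < k) (s : PySem.Set String) (x : String) :
    (List.replicate k x).foldl PySem.Set.add s = s.add x := by
  induction k generalizing s with
  | zero => omega
  | succ n ih =>
    rw [List.replicate_succ, List.foldl_cons]
    rcases Nat.eq_zero_or_pos n with h0 | hp
    · subst h0; simp
    · rw [ih hp]
      unfold PySem.Set.add PySem.Set.contains
      split_ifs with h1 <;> simp_all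

lemma pvSet_flatMap_rep (k : Nat) (hk : 0 < k) (l : List String) :
    PySem.Set.ofList (l.flatMap (List.replicate k)) = PySem.Set.ofList l := by
  unfold PySem.Set.ofList
  generalize PySem.Set.empty = s
  induction l generalizing s with
  | nil => simp
  | cons x xs ih =>
    rw [List.flatMap_cons, List.foldl_append, pvSet_add_rep k hk, List.foldl_cons]
    exact ih _

lemma pvCount_flatMap_rep (k : Nat) (l : List String) (v : String) :
    (l.flatMap (List.replicate k)).count v = k * l.count v := by
  induction l with
  | nil => simp
  | cons x xs ih =>
    rw [List.flatMap_cons, List.count_append, ih, List.count_cons]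
    rw [List.count_replicate]
    by_cases h : x = v <;> simp [h, Nat.mul_add] <;> ring

lemma pvInsertBy_map {α β : Type} (φ : α → β) (p : α → α → Bool) (q : β → β → Bool)
    (h : ∀ a b, q (φ a) (φ b) = p a b) (x : α) (ys : List α) :
    PySem.List.insertBy q (φ x) (ys.map φ) = (PySem.List.insertBy p x ys).map φ := by
  induction ys with
  | nil => simp [PySem.List.insertBy]
  | cons y t ih =>
    rw [List.map_cons]
    unfold PySem.List.insertBy
    rw [h x y]
    by_cases hb : p x y = true <;> simp [hb, ih]

lemma pvFoldl_insertBy_map {α β : Type} (φ : α → β) (p : α → α → Bool) (q : β → β → Bool)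
    (h : ∀ a b, q (φ a) (φ b) = p a b) (l : List α) (acc : List α) :
    (l.map φ).foldl (fun acc x => PySem.List.insertBy q x acc) (acc.map φ)
      = (l.foldl (fun acc x => PySem.List.insertBy p x acc) acc).map φ := by
  induction l generalizing acc with
  | nil => simp
  | cons x t ih =>
    rw [List.map_cons, List.foldl_cons, List.foldl_cons, pvInsertBy_map φ p q h, ih]

lemma pvSorted_scale (l : List (String × Int)) (k : Int) (hk : 0 < k) :
    PySem.List.sorted (l.map (fun p => (p.1, k * p.2))) (fun p => p.2) true
      = (PySem.List.sorted l (fun p => p.2) true).map (fun p => (p.1, k * p.2)) := by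
  rw [PySem.List.sorted_rev_eq_foldl_insertBy, PySem.List.sorted_rev_eq_foldl_insertBy]
  have := pvFoldl_insertBy_map (fun p : String × Int => (p.1, k * p.2))
      (fun a b => decide (b.2 < a.2)) (fun a b => decide (b.2 < a.2))
      (fun a b => by simp [Int.mul_lt_mul_left hk]) l []
  simpa using this

lemma pvTop10_of_counter (l : List String) :
    ((PySem.List.sorted (PySem.Dict.counter l).items (fun p => p.2) true).take 10).map (fun p => p.1)
      = ((PySem.List.sorted ((PySem.Set.ofList l).map (fun v => (v, (List.count v l : Int))))
            (fun p => p.2) true).take 10).map (fun p => p.1) := by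
  rw [PySem.Dict.items_counter]

lemma pvTop10_scale (l : List String) (k : Nat) (hk : 0 < k) :
    pvTop10 (PySem.Dict.counter (l.flatMap (List.replicate k))) = pvTop10 (PySem.Dict.counter l) := by
  unfold pvTop10
  rw [pvTop10_of_counter, pvTop10_of_counter, pvSet_flatMap_rep k hk]
  have hmap : (PySem.Set.ofList l).map (fun v => (v, (List.count v (l.flatMap (List.replicate k)) : Int)))
      = ((PySem.Set.ofList l).map (fun v => (v, (List.count v l : Int)))).map
          (fun p => (p.1, (k : Int) * p.2)) := by
    rw [List.map_map]
    apply List.map_congr_left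
    intro v _
    simp [pvCount_flatMap_rep k l v]
  rw [hmap, pvSorted_scale _ (k : Int) (by exact_mod_cast hk)]
  rw [List.map_take, List.map_take, List.map_map]
  rfl

lemma pvInsert_eq_self {ν : Type} (d : PySem.Dict String ν) (k : String) (v : ν)
    (hn : d.keys.Nodup) (h : d.get? k = some v) : d.insert k v = d := by
  have hc : d.contains k = true := by
    rw [PySem.Dict.contains_eq_isSome_get? d k, h]; rfl
  unfold PySem.Dict.insert
  rw [hc]
  simp only [if_true]
  cases d with
  | mk items =>
    congr 1
    simp only
    unfold PySem.Dict.get? at h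
    unfold PySem.Dict.keys at hn
    clear hc
    induction items with
    | nil => simp at h
    | cons p t ih =>
      rw [List.map_cons] at hn
      have hn' := List.nodup_cons.mp hn
      by_cases hp : p.1 = k
      · have hfind : List.find? (fun q => q.1 == k) (p :: t) = some p := by
          simp [hp]
        rw [hfind] at h
        simp at h
        have hpt : p = (k, v) := by
          cases p; simp at hp h ⊢; exact ⟨hp, h⟩
        rw [List.map_cons]
        have htail : ∀ q ∈ t, (if (q.1 == k) = true then (k, v) else q) = q := by
          intro q hq
          have : q.1 ≠ k := by
            intro hqk
            exact hn'.1 (by rw [hp, ← hqk]; exact List.mem_map.mpr ⟨q, hq, rfl⟩)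
          simp [this]
        rw [List.map_congr_left htail, List.map_id', hpt]
        simp
      · rw [List.map_cons]
        have hbe : (p.1 == k) = false := by simpa using hp
        rw [List.find?_cons_of_neg (by simp [hbe])] at h
        rw [ih hn'.2 h]
        simp [hbe]

lemma pvBuild_eq {ν : Type} (ts : List String) (F G : String → ν)
    (h : ∀ t ∈ ts, F t = G t) (r : PySem.Dict String ν) (hn : r.keys.Nodup)
    (hinv : ∀ t, r.contains t = true → r.get? t = some (F t)) :
    ts.foldl (fun r token => r.insert token (F token)) r
      = ts.foldl (fun r t => if r.contains t then r else r.insert t (G t)) r := by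
  induction ts generalizing r with
  | nil => rfl
  | cons t rest ih =>
    rw [List.foldl_cons, List.foldl_cons]
    by_cases hc : r.contains t = true
    · rw [if_pos hc, pvInsert_eq_self r t (F t) hn (hinv t hc)]
      exact ih (fun x hx => h x (List.mem_cons_of_mem _ hx)) r hn hinv
    · rw [if_neg hc, ← h t List.mem_cons_self]
      apply ih (fun x hx => h x (List.mem_cons_of_mem _ hx))
      · exact PySem.Dict.nodup_keys_insert r t (F t) hn
      · intro x hx
        by_cases he : x = t
        · subst he; exact PySem.Dict.get?_insert_self _ _ _
        · rw [PySem.Dict.get?_insert_of_ne _ _ he]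
          apply hinv
          rw [PySem.Dict.contains_eq_isSome_get?] at hx ⊢
          rwa [PySem.Dict.get?_insert_of_ne _ _ he] at hx


-- the exact step function of port A, rewritten onto the normalized word list
lemma pvFoldl_fcongr {α β : Type} (l : List α) (i : β) {f g : β → α → β} (h : f = g) :
    l.foldl f i = l.foldl g i := by rw [h]

lemma pvBodyW_eq (words : List String) (i : Int) (w : String) :
    (fun (tc : PySem.Dict String (PySem.Dict String Int × PySem.Dict String Int)) (target : String) =>
      if PySem.Str.isIn (pvKey target) (pvNorm w) then
        let tc := if 0 < i then
            tc.modify target pvEmptyPair (fun p =>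
              (p.1.modify (pvNorm (PySem.List.pyGetD words (i - 1) "")) 0 (· + 1), p.2))
          else tc
        if i < (words.length : Int) - 1 then
          tc.modify target pvEmptyPair (fun p =>
            (p.1, p.2.modify (pvNorm (PySem.List.pyGetD words (i + 1) "")) 0 (· + 1)))
        else tc
      else tc)
    = pvBodyN (words.map pvNorm) (i, pvNorm w) := by
  funext tc target
  unfold pvBodyN
  have h1 : pvNorm (PySem.List.pyGetD words (i - 1) "") = PySem.List.pyGetD (words.map pvNorm) (i - 1) "" := by
    have := PySem.List.pyGetD_map pvNorm words (i - 1) ""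
    rw [pvNorm_empty] at this
    exact this.symm
  have h2 : pvNorm (PySem.List.pyGetD words (i + 1) "") = PySem.List.pyGetD (words.map pvNorm) (i + 1) "" := by
    have := PySem.List.pyGetD_map pvNorm words (i + 1) ""
    rw [pvNorm_empty] at this
    exact this.symm
  rw [h1, h2, List.length_map]

lemma pvA_loop_eq (tt : List String) (rt : List String)
    (tc : PySem.Dict String (PySem.Dict String Int × PySem.Dict String Int)) :
    rt.foldl (fun tc text =>
      let words := PySem.Str.split₀ text
      (PySem.List.enumerate words).foldl (fun tc iw =>
        let i := iw.1
        let normalized := pvNorm iw.2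
        tt.foldl (fun tc target =>
          if PySem.Str.isIn (pvKey target) normalized then
            let tc := if 0 < i then
                tc.modify target pvEmptyPair (fun p =>
                  (p.1.modify (pvNorm (PySem.List.pyGetD words (i - 1) "")) 0 (· + 1), p.2))
              else tc
            if i < (words.length : Int) - 1 then
              tc.modify target pvEmptyPair (fun p =>
                (p.1, p.2.modify (pvNorm (PySem.List.pyGetD words (i + 1) "")) 0 (· + 1)))
            else tc
          else tc) tc) tc) tc
    = (rt.map (fun text => (PySem.Str.split₀ text).map pvNorm)).foldl
        (fun tc ns => (PySem.List.enumerate ns).foldl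
          (fun tc iw => tt.foldl (pvBodyN ns iw) tc) tc) tc := by
  rw [List.foldl_map]
  apply pvFoldl_fcongr
  funext tc text
  show (PySem.List.enumerate (PySem.Str.split₀ text)).foldl _ tc = _
  rw [pvEnumerate_map pvNorm (PySem.Str.split₀ text) 0, List.foldl_map]
  apply pvFoldl_fcongr
  funext tc iw
  exact pvFoldl_fcongr tt tc (pvBodyW_eq (PySem.Str.split₀ text) iw.1 iw.2)

-- B's neighbor-list pass computes exactly the event projections
lemma pvB_char (key : String) (nt : List (List String)) :
    nt.foldl (fun ba ns =>
      let last := (ns.length : Int) - 1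
      (PySem.List.enumerate ns).foldl (fun ba iw =>
        if PySem.Str.isIn key iw.2 then
          let ba' := if 0 < iw.1 then (ba.1 ++ [PySem.List.pyGetD ns (iw.1 - 1) ""], ba.2) else ba
          if iw.1 < last then (ba'.1, ba'.2 ++ [PySem.List.pyGetD ns (iw.1 + 1) ""]) else ba'
        else ba) ba) (([] : List String), ([] : List String))
    = (pvBefA (pvOps key nt), pvAftA (pvOps key nt)) := by
  have hstep : ∀ ns : List String,
      (fun (ba : List String × List String) (iw : Int × String) =>
        if PySem.Str.isIn key iw.2 then
          let ba' := if 0 < iw.1 then (ba.1 ++ [PySem.List.pyGetD ns (iw.1 - 1) ""], ba.2) else ba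
          if iw.1 < (ns.length : Int) - 1 then (ba'.1, ba'.2 ++ [PySem.List.pyGetD ns (iw.1 + 1) ""]) else ba'
        else ba)
      = fun ba iw => (pvEv key ns iw).foldl pvApp2 ba := by
    intro ns
    funext ba iw
    exact pvB_step key ns iw ba
  calc nt.foldl (fun ba ns =>
        let last := (ns.length : Int) - 1
        (PySem.List.enumerate ns).foldl (fun ba iw =>
          if PySem.Str.isIn key iw.2 then
            let ba' := if 0 < iw.1 then (ba.1 ++ [PySem.List.pyGetD ns (iw.1 - 1) ""], ba.2) else ba
            if iw.1 < last then (ba'.1, ba'.2 ++ [PySem.List.pyGetD ns (iw.1 + 1) ""]) else ba'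
          else ba) ba) (([] : List String), ([] : List String))
      = nt.foldl (fun ba ns => ((PySem.List.enumerate ns).flatMap (pvEv key ns)).foldl pvApp2 ba)
          (([] : List String), ([] : List String)) := by
        apply pvFoldl_fcongr
        funext ba ns
        show (PySem.List.enumerate ns).foldl _ ba = _
        rw [hstep ns, ← List.foldl_flatMap]
    _ = (pvOps key nt).foldl pvApp2 (([] : List String), ([] : List String)) := by
        rw [pvOps, List.foldl_flatMap]
    _ = (pvBefA (pvOps key nt), pvAftA (pvOps key nt)) := by
        rw [pvApp2_foldl]
        simp


-- literal characterizations of the two ports (rfl after zeta-reduction of the lets)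
def pvTcFinal (rt tt : List String) :
    PySem.Dict String (PySem.Dict String Int × PySem.Dict String Int) :=
  rt.foldl (fun tc text =>
    let words := PySem.Str.split₀ text
    (PySem.List.enumerate words).foldl (fun tc iw =>
      let i := iw.1
      let normalized := pvNorm iw.2
      tt.foldl (fun tc target =>
        if PySem.Str.isIn (pvKey target) normalized then
          let tc := if 0 < i then
              tc.modify target pvEmptyPair (fun p =>
                (p.1.modify (pvNorm (PySem.List.pyGetD words (i - 1) "")) 0 (· + 1), p.2))
            else tc
          if i < (words.length : Int) - 1 then
            tc.modify target pvEmptyPair (fun p =>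
              (p.1, p.2.modify (pvNorm (PySem.List.pyGetD words (i + 1) "")) 0 (· + 1)))
          else tc
        else tc) tc) tc)
    (tt.foldl (fun d token => d.insert token pvEmptyPair) PySem.Dict.empty)

def pvFA (rt tt : List String) (token : String) : List (String × List String) :=
  [("before", pvTop10 ((pvTcFinal rt tt).getD token pvEmptyPair).1),
   ("after",  pvTop10 ((pvTcFinal rt tt).getD token pvEmptyPair).2)]

def pvNT (rt : List String) : List (List String) :=
  rt.map (fun text => (PySem.Str.split₀ text).map pvNorm)

def pvBA (nt : List (List String)) (target : String) : List String × List String :=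
  nt.foldl (fun ba norm =>
    let last := (norm.length : Int) - 1
    (PySem.List.enumerate norm).foldl (fun ba iw =>
      if PySem.Str.isIn (pvKey target) iw.2 then
        let ba := if 0 < iw.1 then (ba.1 ++ [PySem.List.pyGetD norm (iw.1 - 1) ""], ba.2) else ba
        if iw.1 < last then (ba.1, ba.2 ++ [PySem.List.pyGetD norm (iw.1 + 1) ""]) else ba
      else ba) ba) (([] : List String), ([] : List String))

def pvGB (nt : List (List String)) (target : String) : List (String × List String) :=
  [("before", pvTop10 (PySem.Dict.counter (pvBA nt target).1)),
   ("after",  pvTop10 (PySem.Dict.counter (pvBA nt target).2))]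

lemma pvBA_char (rt : List String) (target : String) :
    pvBA (pvNT rt) target
      = (pvBefA (pvOps (pvKey target) (pvNT rt)), pvAftA (pvOps (pvKey target) (pvNT rt))) := by
  unfold pvBA
  exact pvB_char (pvKey target) (pvNT rt)

lemma pvA_items (rt tt : List String) (cw : Int) :
    extract_token_contexts rt tt cw
      = (tt.foldl (fun r token => r.insert token (pvFA rt tt token)) PySem.Dict.empty).items := rfl

lemma pvB_items (rt tt : List String) (cw : Int) :
    extract_token_contexts_alt rt tt cw
      = (tt.foldl (fun r target =>
          if r.contains target then r else r.insert target (pvGB (pvNT rt) target))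
          PySem.Dict.empty).items := rfl

lemma pvCounter_eq1 (l : List String) :
    l.foldl (fun d w => d.modify w 0 (· + 1)) pvEmptyPair.1 = PySem.Dict.counter l := rfl

lemma pvCounter_eq2 (l : List String) :
    l.foldl (fun d w => d.modify w 0 (· + 1)) pvEmptyPair.2 = PySem.Dict.counter l := rfl

lemma pvFA_eq_pvGB (rt tt : List String) (t : String) (ht : t ∈ tt) :
    pvFA rt tt t = pvGB (pvNT rt) t := by
  have hk : 0 < tt.count t := List.count_pos_iff.mpr ht
  have hinit := pvInit_get? tt PySem.Dict.empty t (Or.inl ht)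
  have hfin := pvTexts_loop tt (rt.map (fun text => (PySem.Str.split₀ text).map pvNorm))
      _ t pvEmptyPair hinit
  unfold pvFA pvGB pvTcFinal pvNT
  rw [pvA_loop_eq tt rt]
  simp only [PySem.Dict.getD, hfin, Option.getD_some]
  rw [pvApp1_foldl]
  have hba := pvBA_char rt t
  unfold pvNT at hba
  rw [hba]
  rw [pvCounter_eq1, pvCounter_eq2, pvBefA_opsK, pvAftA_opsK,
      pvTop10_scale _ _ hk, pvTop10_scale _ _ hk]

-- ===== VERDICT (by name: the statement is the Claim_ definition above) =====
theorem extract_token_contexts_spec : Claim_equal_extract_token_contexts := by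
  intro rt tt cw _
  unfold Spec_extract_token_contexts
  rw [pvA_items rt tt cw, pvB_items rt tt cw]
  congr 1
  apply pvBuild_eq tt (pvFA rt tt) (pvGB (pvNT rt))
    (fun t ht => pvFA_eq_pvGB rt tt t ht) PySem.Dict.empty
    (by simp [PySem.Dict.keys, PySem.Dict.empty])
    (by intro t hc; simp [PySem.Dict.contains, PySem.Dict.empty] at hc)
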